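-- pv_equiv track=rewrite | github.com/SimonRenblad/perfect-sum | perfect_sum.py | perfect_sum
-- ===== SOURCE A (Python) =====
-- def perfect_sum(array, target):
--
--     num_elements = len(array)
--
--     # need to keep track of previous combination (represented as binary)
--     previous_combination = [0]*num_elements
--
--     # check sizes of the varying subsets
--     for subset_size in range(1, num_elements + 1):
--
--         # reset combination
--         previous_combination = [0]*num_elements
--
--         # final combination with a given number of 1s in binary representation
--         final_combination_of_size = [0] * (num_elements - subset_size) + [1] * subset_size
--
--         # iterate over combinations of size 'subset_size'
--         while not str(final_combination_of_size) == str(previous_combination):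
--
--             ## GENERATE COMBINATION AS BITSTRING
--
--             # first bitstring of size 'subset_size'
--             if str(previous_combination) == str([0]*num_elements):
--                 previous_combination = [1] * subset_size + [0] * (num_elements - subset_size)
--
--             # not first bitstring of size 'subset_size'
--             else:
--
--                 # backwards passing index
--                 i = num_elements - 1
--
--                 # depth tracks the number of 'blocked' 1s in the previous bitstring
--                 depth = 0
--
--                 # loop until next combination is found
--                 while i >= 0:
--
--                     # ignore 0s
--                     if previous_combination[i] == 1:
--
--                         # blocked i, increase depth and move pointed down
--                         if i == (num_elements - 1) or previous_combination[i + 1] == 1: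
--                             depth += 1
--                             i -= 1
--
--                         # i not blocked, move forward bit and add past blocked bits according to depth variable
--                         else:
--
--                             # forward passing index
--                             j = i + 1
--
--                             # move unblocked bit forward
--                             previous_combination[i] = 0
--                             previous_combination[j] = 1
--
--                             # iterate over remaining right side bits, adding 1s according to depth, 0s otherwise
--                             while j < num_elements - 1:
--                                 j += 1
--                                 if depth > 0:
--                                     previous_combination[j] = 1
--                                     depth -= 1
--                                 else:
--                                     previous_combination[j] = 0
--
--                             # combination created
--                             break
--
--                     # 0 in previous combination, decrement backwards passing index
--                     else:
--                         i -= 1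
--
--             ## SUM ELEMENTS AND CHECK
--
--             # index list for printing
--             indices = []
--
--             # sum variable, set as None to allow strings and lists as well
--             sum_found = None
--
--             # execute sum on combination
--             for i, bit in enumerate(previous_combination):
--
--                 if bit == 1:
--
--                     indices.append(i)
--
--                     if sum_found == None:
--                         sum_found = array[i]
--                     else:
--                         sum_found += array[i]
--
--             #check sum, stop if found
--             if sum_found == target:
--                 return indices
--
--     #no indices found, return empty list
--     return []
-- ===== SOURCE B (Python) =====
-- def perfect_sum(array, target):
--     n = len(array)
--
--     def combos(start, k):
--         # all strictly increasing k-lists of indices drawn from range(start, n), lexicographic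
--         if k == 0:
--             return [[]]
--         result = []
--         for first in range(start, n - k + 1):
--             for rest in combos(first + 1, k - 1):
--                 result.append([first] + rest)
--         return result
--
--     for size in range(1, n + 1):
--         for combo in combos(0, size):
--             acc = None
--             for i in combo:
--                 acc = array[i] if acc is None else acc + array[i]
--             if acc == target:
--                 return combo
--     return []
-- ===== Notes on version B (the rewrite author's own statement) =====
-- stated objective: alternative
-- what changed: A enumerates each subset size by mutating a 0/1 bit-list with a hand-written backwards blocked-bit successor scan (comparing loop states via str()); B instead generates the index combinations of each size directly with a simple recursive combos(start, k) generator and scans them, keeping the None-seeded left-to-right accumulation.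
import Mathlib
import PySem

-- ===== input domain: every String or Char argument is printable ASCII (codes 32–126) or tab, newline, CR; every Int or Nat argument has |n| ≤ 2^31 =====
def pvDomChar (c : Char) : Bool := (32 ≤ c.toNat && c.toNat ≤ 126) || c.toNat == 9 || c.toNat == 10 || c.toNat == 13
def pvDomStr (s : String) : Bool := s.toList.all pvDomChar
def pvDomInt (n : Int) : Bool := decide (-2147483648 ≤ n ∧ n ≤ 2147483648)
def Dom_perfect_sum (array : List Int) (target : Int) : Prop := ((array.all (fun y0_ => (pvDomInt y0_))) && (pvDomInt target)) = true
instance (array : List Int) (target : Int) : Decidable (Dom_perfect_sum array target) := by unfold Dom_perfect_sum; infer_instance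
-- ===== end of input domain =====

-- B replaces A's hand-rolled bitstring successor generator (with its str()-based loop tests)
-- by a recursive generator of index combinations, scanned smallest-size-first; objective: alternative.


-- ===== PORT A =====

-- inner `while j < num_elements - 1` fill loop of A (j has already been moved to i+1)
def stepFill (n : Nat) (c : List Int) (depth : Nat) (j : Nat) : List Int :=
  if j < n - 1 then
    (if depth > 0 then stepFill n (c.set (j + 1) 1) (depth - 1) (j + 1)
     else stepFill n (c.set (j + 1) 0) depth (j + 1))
  else c
  termination_by n - 1 - j

-- A's backwards `while i >= 0` scan (depth counts blocked 1s); i, j are Python ints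
def stepLoop (n : Nat) (c : List Int) (depth : Nat) (i : Int) : List Int :=
  if _h : 0 ≤ i then
    if PySem.List.pyGet? c i = some 1 then
      if i = (n : Int) - 1 ∨ PySem.List.pyGet? c (i + 1) = some 1 then
        stepLoop n c (depth + 1) (i - 1)
      else
        -- previous_combination[i] = 0; previous_combination[j] = 1; then the fill loop
        stepFill n ((c.set i.toNat 0).set (i + 1).toNat 1) depth (i + 1).toNat
    else stepLoop n c depth (i - 1)
  else c
  termination_by (i + 1).toNat
  decreasing_by all_goals omega

-- `for i, bit in enumerate(previous_combination)` accumulating indices and the None-seeded sum;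
-- array.getD i 0: i < len(array) on every reachable state, where Python's array[i] is exact
def sumCheckLoop (array : List Int) (bits : List Int) (i : Nat) (idxs : List Int)
    (s : Option Int) : List Int × Option Int :=
  match bits with
  | [] => (idxs, s)
  | bit :: rest =>
    if bit = 1 then
      sumCheckLoop array rest (i + 1) (idxs ++ [(i : Int)])
        (some (match s with | none => array.getD i 0 | some a => a + array.getD i 0))
    else sumCheckLoop array rest (i + 1) idxs s

-- one `## GENERATE COMBINATION AS BITSTRING` step
def genNext (n ss : Nat) (prev : List Int) : List Int :=
  if prev = List.replicate n 0 then List.replicate ss 1 ++ List.replicate (n - ss) 0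
  else stepLoop n prev 0 ((n : Int) - 1)

-- the `while not str(final…) == str(previous…)` loop; fuel 2^n exceeds the C(n,ss)+1 iterations,
-- so it is never exhausted (proved below); some = early `return indices`
def innerLoop (array : List Int) (target : Int) (n ss : Nat) (finalC prev : List Int)
    (fuel : Nat) : Option (List Int) :=
  match fuel with
  | 0 => none
  | fuel + 1 =>
    if prev = finalC then none
    else
      let next := genNext n ss prev
      let r := sumCheckLoop array next 0 [] none
      if r.2 = some target then some r.1
      else innerLoop array target n ss finalC next fuel

-- `for subset_size in range(1, num_elements + 1)`
def outerLoop (array : List Int) (target : Int) (n : Nat) : List Nat → List Int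
  | [] => []
  | ss :: rest =>
    match innerLoop array target n ss
        (List.replicate (n - ss) 0 ++ List.replicate ss 1) (List.replicate n 0) (2 ^ n) with
    | some idx => idx
    | none => outerLoop array target n rest

def perfect_sum (array : List Int) (target : Int) : List Int :=
  outerLoop array target array.length (List.range' 1 array.length)

-- ===== PORT B =====

-- B's None-seeded accumulation `acc = array[i] if acc is None else acc + array[i]`;
-- array.getD i 0: every generated index is < len(array), where Python's array[i] is exact
def accLoop (array : List Int) : List Nat → Option Int → Option Int
  | [], s => s
  | i :: rest, s =>
    accLoop array rest (some (match s with | none => array.getD i 0 | some a => a + array.getD i 0))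

-- B's recursive combos(start, k): strictly increasing k-lists from range(start, n), lexicographic
def combosB (n start k : Nat) : List (List Nat) :=
  match k with
  | 0 => [[]]
  | k + 1 => (List.range' start (n - k - start)).flatMap fun f => (combosB n (f + 1) k).map (f :: ·)

-- `for combo in combos(0, size)` with the acc == target test and early return
def findCombo (array : List Int) (target : Int) : List (List Nat) → Option (List Int)
  | [] => none
  | c :: cs =>
    if accLoop array c none = some target then some (c.map Int.ofNat)
    else findCombo array target cs

-- `for size in range(1, n + 1)`
def altScan (array : List Int) (target : Int) (n : Nat) : List Nat → List Int
  | [] => []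
  | size :: rest =>
    match findCombo array target (combosB n 0 size) with
    | some c => c
    | none => altScan array target n rest

def perfect_sum_alt (array : List Int) (target : Int) : List Int :=
  altScan array target array.length (List.range' 1 array.length)

-- ===== PRECONDITION & SPEC =====
def Spec_perfect_sum (array : List Int) (target : Int) (out : List Int) : Prop := out = perfect_sum_alt array target
instance (array : List Int) (target : Int) (out : List Int) : Decidable (Spec_perfect_sum array target out) := by unfold Spec_perfect_sum; infer_instance

-- ===== CLAIM (what is proved, stated in full; the proofs are below) =====
def Claim_equal_perfect_sum : Prop := ∀ (array : List Int) (target : Int), Dom_perfect_sum array target → Spec_perfect_sum array target (perfect_sum array target)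

-- ===== LEMMAS AND PROOFS =====

-- All length-n 0/1 lists with k ones, in exactly the order A's generator visits them
def allBits : Nat → Nat → List (List Int)
  | n, 0 => [List.replicate n 0]
  | 0, _ + 1 => []
  | n + 1, k + 1 => (allBits n k).map (1 :: ·) ++ (allBits n (k + 1)).map (0 :: ·)

def stepA (c : List Int) : List Int := stepLoop c.length c 0 ((c.length : Int) - 1)

-- `t` has an adjacent "1,0" pair, i.e. a movable 1
def HasMove (t : List Int) : Prop := ∃ j : Nat, t[j]? = some 1 ∧ t[j + 1]? = some 0

-- the one-positions of a bitstring, offset by i (matches sumCheckLoop's and onesIdx's `bit = 1` test)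
def onesIdx (i : Nat) : List Int → List Nat
  | [] => []
  | b :: t => if b = 1 then i :: onesIdx (i + 1) t else onesIdx (i + 1) t

-- first bitstring in the list whose checked sum hits the target, with its index list
def firstMatch (array : List Int) (target : Int) : List (List Int) → Option (List Int)
  | [] => none
  | c :: cs =>
    let r := sumCheckLoop array c 0 [] none
    if r.2 = some target then some r.1 else firstMatch array target cs


-- ---- unfolding lemmas for stepLoop / stepFill ----


theorem getElem?_some_lt {l : List Int} {i : Nat} {v : Int} (h : l[i]? = some v) :
    i < l.length := by
  by_contra hc
  rw [List.getElem?_eq_none (by omega)] at h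
  cases h

theorem stepLoop_skip {n : Nat} {c : List Int} {d : Nat} {i : Int} (h0 : 0 ≤ i)
    (hv : PySem.List.pyGet? c i ≠ some 1) :
    stepLoop n c d i = stepLoop n c d (i - 1) := by
  rw [stepLoop]; simp [h0, hv]

theorem stepLoop_blocked {n : Nat} {c : List Int} {d : Nat} {i : Int} (h0 : 0 ≤ i)
    (hv : PySem.List.pyGet? c i = some 1)
    (hb : i = (n : Int) - 1 ∨ PySem.List.pyGet? c (i + 1) = some 1) :
    stepLoop n c d i = stepLoop n c (d + 1) (i - 1) := by
  rw [stepLoop]; simp [h0, hv, hb]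

theorem stepLoop_move {n : Nat} {c : List Int} {d : Nat} {i : Int} (h0 : 0 ≤ i)
    (hv : PySem.List.pyGet? c i = some 1)
    (hb : ¬(i = (n : Int) - 1 ∨ PySem.List.pyGet? c (i + 1) = some 1)) :
    stepLoop n c d i = stepFill n ((c.set i.toNat 0).set (i + 1).toNat 1) d (i + 1).toNat := by
  rw [stepLoop]; simp [h0, hv, hb]

theorem stepFill_stop {n : Nat} {c : List Int} {d j : Nat} (h : ¬ j < n - 1) :
    stepFill n c d j = c := by
  rw [stepFill]; simp [h]

theorem stepFill_one {n : Nat} {c : List Int} {d j : Nat} (h : j < n - 1) (hd : 0 < d) :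
    stepFill n c d j = stepFill n (c.set (j + 1) 1) (d - 1) (j + 1) := by
  rw [stepFill]; simp [h, hd]

theorem stepFill_zero {n : Nat} {c : List Int} {j : Nat} (h : j < n - 1) :
    stepFill n c 0 j = stepFill n (c.set (j + 1) 0) 0 (j + 1) := by
  rw [stepFill]; simp [h]

-- ---- the scan commutes with a cons prefix while a movable 1 lies at or below the index ----

theorem stepFill_cons (x : Int) : ∀ (m n j d : Nat) (c : List Int), m = n - 1 - j →
    stepFill (n + 1) (x :: c) d (j + 1) = x :: stepFill n c d j := by
  intro m
  induction m with
  | zero =>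
    intro n j d c hm
    have h1 : ¬ j + 1 < (n + 1) - 1 := by omega
    have h2 : ¬ j < n - 1 := by omega
    rw [stepFill_stop h1, stepFill_stop h2]
  | succ m ih =>
    intro n j d c hm
    have h1 : j + 1 < (n + 1) - 1 := by omega
    have h2 : j < n - 1 := by omega
    rcases Nat.eq_zero_or_pos d with hd | hd
    · subst hd
      rw [stepFill_zero h1, stepFill_zero h2, List.set_cons_succ,
        ih n (j + 1) 0 (c.set (j + 1) 0) (by omega)]
    · rw [stepFill_one h1 hd, stepFill_one h2 hd, List.set_cons_succ,
        ih n (j + 1) (d - 1) (c.set (j + 1) 1) (by omega)]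

theorem stepLoop_cons (x : Int) (t : List Int) :
    ∀ (i : Nat), i < t.length → ∀ (d : Nat),
    (∃ j : Nat, j ≤ i ∧ t[j]? = some 1 ∧ t[j + 1]? = some 0) →
    stepLoop (t.length + 1) (x :: t) d ((i : Int) + 1) = x :: stepLoop t.length t d (i : Int) := by
  intro i
  induction i with
  | zero =>
    intro hi d hmv
    obtain ⟨j, hj, h1, h0⟩ := hmv
    interval_cases j
    -- the bit at 0 is 1 and at 1 is 0: the move branch fires on both sides
    simp only [Nat.cast_zero]
    have hlen : 1 < t.length := getElem?_some_lt h0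
    have hv : PySem.List.pyGet? (x :: t) ((0 : Int) + 1) = some 1 := by
      have : ((0 : Int) + 1) = ((1 : Nat) : Int) := by norm_num
      rw [this, PySem.List.pyGet?_natCast]; simpa using h1
    have hv' : PySem.List.pyGet? t (0 : Int) = some 1 := by
      have : ((0 : Int)) = ((0 : Nat) : Int) := by norm_num
      rw [this, PySem.List.pyGet?_natCast]; simpa using h1
    have hnb : ¬(((0 : Int) + 1) = ((t.length + 1 : Nat) : Int) - 1 ∨
        PySem.List.pyGet? (x :: t) ((0 : Int) + 1 + 1) = some 1) := by
      push Not
      constructor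
      · push_cast; omega
      · have : ((0 : Int) + 1 + 1) = ((2 : Nat) : Int) := by norm_num
        rw [this, PySem.List.pyGet?_natCast]
        simp only [List.getElem?_cons_succ]
        rw [h0]; decide
    have hnb' : ¬((0 : Int) = ((t.length : Nat) : Int) - 1 ∨
        PySem.List.pyGet? t ((0 : Int) + 1) = some 1) := by
      push Not
      constructor
      · omega
      · have : ((0 : Int) + 1) = ((1 : Nat) : Int) := by norm_num
        rw [this, PySem.List.pyGet?_natCast, h0]; decide
    rw [stepLoop_move (by norm_num) hv hnb, stepLoop_move (by norm_num) hv' hnb']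
    have e1 : ((0 : Int) + 1).toNat = 1 := by decide
    have e2 : ((0 : Int) + 1 + 1).toNat = 2 := by decide
    have e3 : ((0 : Int)).toNat = 0 := by decide
    rw [e1, e2, e3]
    have : (x :: t).set 1 0 = x :: t.set 0 0 := List.set_cons_succ ..
    rw [this]
    have : (x :: t.set 0 0).set 2 1 = x :: (t.set 0 0).set 1 1 := List.set_cons_succ ..
    rw [this]
    exact stepFill_cons x (t.length - 1 - 1) t.length 1 d _ rfl
  | succ i ih =>
    intro hi d hmv
    have h0 : (0 : Int) ≤ (i : Int) + 1 := by positivity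
    have hget : PySem.List.pyGet? (x :: t) (((i + 1 : Nat) : Int) + 1) = t[i + 1]? := by
      have : (((i + 1 : Nat) : Int) + 1) = ((i + 2 : Nat) : Int) := by push_cast; ring
      rw [this, PySem.List.pyGet?_natCast, List.getElem?_cons_succ]
    have hget' : PySem.List.pyGet? t ((i + 1 : Nat) : Int) = t[i + 1]? := by
      rw [PySem.List.pyGet?_natCast]
    by_cases hv : t[i + 1]? = some 1
    · -- bit is 1: blocked or move, same on both sides
      have hgetnext : PySem.List.pyGet? (x :: t) (((i + 1 : Nat) : Int) + 1 + 1) = t[i + 2]? := by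
        have : (((i + 1 : Nat) : Int) + 1 + 1) = ((i + 3 : Nat) : Int) := by push_cast; ring
        rw [this, PySem.List.pyGet?_natCast, List.getElem?_cons_succ]
      have hgetnext' : PySem.List.pyGet? t (((i + 1 : Nat) : Int) + 1) = t[i + 2]? := by
        have : (((i + 1 : Nat) : Int) + 1) = ((i + 2 : Nat) : Int) := by push_cast; ring
        rw [this, PySem.List.pyGet?_natCast]
      by_cases hb : ((i + 1 : Nat) : Int) = ((t.length : Nat) : Int) - 1 ∨ t[i + 2]? = some 1
      · -- blocked on both sides
        have hbx : (((i + 1 : Nat) : Int) + 1) = ((t.length + 1 : Nat) : Int) - 1 ∨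
            PySem.List.pyGet? (x :: t) (((i + 1 : Nat) : Int) + 1 + 1) = some 1 := by
          rcases hb with hb | hb
          · left; push_cast at hb ⊢; omega
          · right; rw [hgetnext, hb]
        have hbt : ((i + 1 : Nat) : Int) = ((t.length : Nat) : Int) - 1 ∨
            PySem.List.pyGet? t (((i + 1 : Nat) : Int) + 1) = some 1 := by
          rcases hb with hb | hb
          · left; exact hb
          · right; rw [hgetnext', hb]
        rw [stepLoop_blocked (by positivity) (by rw [hget]; exact hv) hbx,
          stepLoop_blocked (by positivity) (by rw [hget']; exact hv) hbt]
        have e1 : ((i + 1 : Nat) : Int) + 1 - 1 = ((i : Nat) : Int) + 1 := by push_cast; ring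
        have e2 : ((i + 1 : Nat) : Int) - 1 = ((i : Nat) : Int) := by push_cast; ring
        rw [e1, e2]
        apply ih (by omega) (d + 1)
        -- the move is strictly below i+1: position i+1 is blocked
        obtain ⟨j, hj, hj1, hj0⟩ := hmv
        refine ⟨j, ?_, hj1, hj0⟩
        rcases Nat.lt_or_ge j (i + 1) with h | h
        · omega
        · exfalso
          have : j = i + 1 := by omega
          subst this
          rcases hb with hb | hb
          · have := getElem?_some_lt hj0
            push_cast at hb; omega
          · rw [hj0] at hb; exact absurd hb (by decide)
      · -- move branch on both sides
        have hbx : ¬((((i + 1 : Nat) : Int) + 1) = ((t.length + 1 : Nat) : Int) - 1 ∨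
            PySem.List.pyGet? (x :: t) (((i + 1 : Nat) : Int) + 1 + 1) = some 1) := by
          push Not at hb ⊢
          exact ⟨by push_cast at hb ⊢; omega, by rw [hgetnext]; exact hb.2⟩
        have hbt : ¬(((i + 1 : Nat) : Int) = ((t.length : Nat) : Int) - 1 ∨
            PySem.List.pyGet? t (((i + 1 : Nat) : Int) + 1) = some 1) := by
          push Not at hb ⊢
          exact ⟨hb.1, by rw [hgetnext']; exact hb.2⟩
        rw [stepLoop_move (by positivity) (by rw [hget]; exact hv) hbx,
          stepLoop_move (by positivity) (by rw [hget']; exact hv) hbt]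
        have e1 : (((i + 1 : Nat) : Int) + 1).toNat = i + 2 := by omega
        have e2 : (((i + 1 : Nat) : Int) + 1 + 1).toNat = i + 3 := by omega
        have e3 : (((i + 1 : Nat) : Int)).toNat = i + 1 := by omega
        rw [e1, e2, e3]
        have s1 : (x :: t).set (i + 2) 0 = x :: t.set (i + 1) 0 := List.set_cons_succ ..
        have s2 : (x :: t.set (i + 1) 0).set (i + 3) 1 = x :: (t.set (i + 1) 0).set (i + 2) 1 :=
          List.set_cons_succ ..
        rw [s1, s2]
        exact stepFill_cons x (t.length - 1 - (i + 2)) t.length (i + 2) d _ rfl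
    · -- bit is not 1: skip on both sides
      rw [stepLoop_skip (n := t.length + 1) (c := x :: t) (by positivity) (by rw [hget]; exact hv)]
      rw [stepLoop_skip (n := t.length) (c := t) (by positivity) (by rw [hget']; exact hv)]
      have e1 : ((i + 1 : Nat) : Int) + 1 - 1 = ((i : Nat) : Int) + 1 := by push_cast; ring
      have e2 : ((i + 1 : Nat) : Int) - 1 = ((i : Nat) : Int) := by push_cast; ring
      rw [e1, e2]
      apply ih (by omega) d
      obtain ⟨j, hj, hj1, hj0⟩ := hmv
      refine ⟨j, ?_, hj1, hj0⟩
      rcases Nat.lt_or_ge j (i + 1) with h | h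
      · omega
      · have hji : j = i + 1 := by omega
        rw [hji] at hj1; exact absurd hj1 hv

theorem stepA_cons {t : List Int} (x : Int) (hmv : HasMove t) :
    stepA (x :: t) = x :: stepA t := by
  obtain ⟨j, hj1, hj0⟩ := hmv
  have hlen : j + 1 < t.length := getElem?_some_lt hj0
  have h1 : t.length - 1 < t.length := by omega
  have e : ((t.length + 1 : Nat) : Int) - 1 = ((t.length - 1 : Nat) : Int) + 1 := by omega
  unfold stepA
  rw [List.length_cons, e]
  have e2 : ((t.length : Nat) : Int) - 1 = ((t.length - 1 : Nat) : Int) := by omega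
  rw [e2]
  exact stepLoop_cons x t (t.length - 1) h1 0 ⟨j, by omega, hj1, hj0⟩



-- ---- the scan walks over a run of trailing 1s (counting depth) and over 0s (unchanged) ----

theorem scan_ones (n : Nat) (w : List Int) (j : Nat) (b : Nat) (d : Nat)
    (h2 : ∀ p : Nat, j ≤ p → p < j + b → w[p]? = some 1)
    (h3 : j + b = n ∨ w[j + b]? = some 1) :
    stepLoop n w d (((j + b : Nat) : Int) - 1) = stepLoop n w (d + b) ((j : Int) - 1) := by
  induction b generalizing d with
  | zero => norm_num
  | succ b ih =>
    have hv : PySem.List.pyGet? w ((j + b : Nat) : Int) = some 1 := by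
      rw [PySem.List.pyGet?_natCast]; exact h2 (j + b) (by omega) (by omega)
    have hb : ((j + b : Nat) : Int) = (n : Int) - 1 ∨
        PySem.List.pyGet? w (((j + b : Nat) : Int) + 1) = some 1 := by
      rcases h3 with h3 | h3
      · left; omega
      · right
        have e : (((j + b : Nat) : Int) + 1) = ((j + (b + 1) : Nat) : Int) := by push_cast; ring
        rw [e, PySem.List.pyGet?_natCast]
        exact h3
    have e1 : ((j + (b + 1) : Nat) : Int) - 1 = ((j + b : Nat) : Int) := by push_cast; ring
    rw [e1, stepLoop_blocked (by positivity) hv hb]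
    have e2 : ((j + b : Nat) : Int) - 1 = ((j + b : Nat) : Int) - 1 := rfl
    rw [ih (d + 1) (fun p hp1 hp2 => h2 p hp1 (by omega))
      (Or.inr (h2 (j + b) (by omega) (by omega)))]
    congr 1
    omega

theorem scan_zeros (n : Nat) (w : List Int) (j : Nat) (a : Nat) (d : Nat)
    (h2 : ∀ p : Nat, j ≤ p → p < j + a → w[p]? = some 0) :
    stepLoop n w d (((j + a : Nat) : Int) - 1) = stepLoop n w d ((j : Int) - 1) := by
  induction a with
  | zero => norm_num
  | succ a ih =>
    have hv : PySem.List.pyGet? w ((j + a : Nat) : Int) ≠ some 1 := by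
      rw [PySem.List.pyGet?_natCast, h2 (j + a) (by omega) (by omega)]; decide
    have e1 : ((j + (a + 1) : Nat) : Int) - 1 = ((j + a : Nat) : Int) := by push_cast; ring
    rw [e1, stepLoop_skip (by positivity) hv]
    exact ih (fun p hp1 hp2 => h2 p hp1 (by omega))

theorem take_set_succ (w : List Int) (j : Nat) (v : Int) (h : j < w.length) :
    (w.set j v).take (j + 1) = w.take j ++ [v] := by
  rw [List.set_eq_take_append_cons_drop, if_pos h, List.take_append]
  simp [List.length_take, Nat.min_eq_left (Nat.le_of_lt h), List.take_succ_cons]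

-- ---- the fill loop writes depth 1s and then 0s over positions j+1 .. n-1 ----

theorem fill_spec (n : Nat) : ∀ (m : Nat) (w : List Int) (d j : Nat), w.length = n →
    j + 1 + m = n → d ≤ m →
    stepFill n w d j = w.take (j + 1) ++ List.replicate d 1 ++ List.replicate (m - d) 0 := by
  intro m
  induction m with
  | zero =>
    intro w d j hw hj hd
    interval_cases d
    rw [stepFill_stop (by omega)]
    have htk : w.take (j + 1) = w := List.take_of_length_le (by omega)
    simp [htk]
  | succ m ih =>
    intro w d j hw hj hd
    have hjn : j + 1 < w.length := by omega
    rcases Nat.eq_zero_or_pos d with hd0 | hd0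
    · subst hd0
      rw [stepFill_zero (n := n) (c := w) (j := j) (by omega),
        ih (w.set (j + 1) 0) 0 (j + 1) (by simpa using hw) (by omega) (by omega)]
      rw [take_set_succ w (j + 1) 0 hjn]
      have e : m + 1 - 0 = m + 1 := rfl
      rw [e]
      simp [List.replicate_succ']
      rw [← List.replicate_succ, List.replicate_succ']
    · rw [stepFill_one (n := n) (c := w) (j := j) (by omega) hd0,
        ih (w.set (j + 1) 1) (d - 1) (j + 1) (by simpa using hw) (by omega) (by omega)]
      rw [take_set_succ w (j + 1) 1 hjn]
      have h1 : [(1 : Int)] ++ List.replicate (d - 1) 1 = List.replicate d 1 := by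
        conv_rhs => rw [show d = (d - 1) + 1 by omega]
        simp [List.replicate_succ]
      have h2 : m - (d - 1) = m + 1 - d := by omega
      simp only [List.append_assoc, h1, h2]

-- ---- the junction: the successor of 1 :: 0^a ++ 1^b is 0 :: 1^(b+1) ++ 0^(a-1) ----

theorem stepA_junction (a b : Nat) (ha : 1 ≤ a) :
    stepA (1 :: (List.replicate a 0 ++ List.replicate b 1)) =
      0 :: (List.replicate (b + 1) 1 ++ List.replicate (a - 1) 0) := by
  set w : List Int := 1 :: (List.replicate a 0 ++ List.replicate b 1) with hwdef
  have hlen : w.length = a + b + 1 := by simp [hwdef]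
  have gz : ∀ p : Nat, 1 ≤ p → p ≤ a → w[p]? = some 0 := by
    intro p h1 h2
    rcases Nat.exists_eq_add_of_le h1 with ⟨q, hq⟩
    subst hq
    have e : 1 + q = q + 1 := by omega
    rw [hwdef, e, List.getElem?_cons_succ,
      List.getElem?_append_left (by simp; omega), List.getElem?_replicate]
    rw [if_pos (by omega)]
  have go : ∀ p : Nat, a + 1 ≤ p → p < a + b + 1 → w[p]? = some 1 := by
    intro p h1 h2
    rcases Nat.exists_eq_add_of_le h1 with ⟨q, hq⟩
    subst hq
    have e : a + 1 + q = (a + q) + 1 := by omega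
    rw [hwdef, e, List.getElem?_cons_succ,
      List.getElem?_append_right (by simp), List.getElem?_replicate]
    simp only [List.length_replicate]
    rw [if_pos (by omega)]
  unfold stepA
  rw [hlen]
  have e1 : ((a + b + 1 : Nat) : Int) - 1 = (((1 + a) + b : Nat) : Int) - 1 := by push_cast; ring
  rw [e1, scan_ones (a + b + 1) w (1 + a) b 0
    (fun p hp1 hp2 => go p (by omega) (by omega)) (Or.inl (by omega))]
  have e2 : (((1 + a) : Nat) : Int) - 1 = (((1 : Nat) + a : Nat) : Int) - 1 := by norm_num
  rw [e2, scan_zeros (a + b + 1) w 1 a (0 + b) (fun p hp1 hp2 => gz p hp1 (by omega))]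
  have ez : (0 : Nat) + b = b := by omega
  rw [ez]
  have hv : PySem.List.pyGet? w (((1 : Nat) : Int) - 1) = some 1 := by
    have e : (((1 : Nat) : Int) - 1) = 0 := by norm_num
    rw [e, hwdef, PySem.List.pyGet?_zero_cons]
  have hnb : ¬((((1 : Nat) : Int) - 1) = ((a + b + 1 : Nat) : Int) - 1 ∨
      PySem.List.pyGet? w (((1 : Nat) : Int) - 1 + 1) = some 1) := by
    push Not
    constructor
    · push_cast; omega
    · have e : (((1 : Nat) : Int) - 1 + 1) = ((1 : Nat) : Int) := by norm_num
      rw [e, PySem.List.pyGet?_natCast, gz 1 le_rfl ha]; decide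
  rw [stepLoop_move (by norm_num) hv hnb]
  have e3 : (((1 : Nat) : Int) - 1).toNat = 0 := by decide
  have e4 : (((1 : Nat) : Int) - 1 + 1).toNat = 1 := by decide
  rw [e3, e4]
  have hset : ((w.set 0 0).set 1 1) =
      0 :: 1 :: (List.replicate (a - 1) 0 ++ List.replicate b 1) := by
    have hrep : List.replicate a (0 : Int) = 0 :: List.replicate (a - 1) 0 := by
      conv_lhs => rw [show a = (a - 1) + 1 by omega]
      simp [List.replicate_succ]
    simp [hwdef, hrep]
  rw [hset]
  rw [fill_spec (a + b + 1) (a + b - 1) _ b 1 (by simp; omega) (by omega) (by omega)]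
  have h5 : (0 : Int) :: 1 :: (List.replicate (a - 1) 0 ++ List.replicate b 1) =
      [0, 1] ++ (List.replicate (a - 1) 0 ++ List.replicate b 1) := rfl
  rw [h5, List.take_append_of_le_length (by simp)]
  have h6 : a + b - 1 - b = a - 1 := by omega
  rw [h6]
  simp [List.replicate_succ]


-- ---- structure of allBits ----

theorem allBits_length (n k : Nat) : ∀ w ∈ allBits n k, w.length = n := by
  induction n, k using allBits.induct with
  | case1 n => simp [allBits]
  | case2 n => simp [allBits]
  | case3 n k ih1 ih2 =>
    intro w hw
    rw [allBits] at hw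
    rcases List.mem_append.mp hw with h | h <;> obtain ⟨t, ht, rfl⟩ := List.mem_map.mp h
    · simp [ih1 t ht]
    · simp [ih2 t ht]

theorem allBits_empty (n k : Nat) (h : n < k) : allBits n k = [] := by
  induction n, k using allBits.induct with
  | case1 n => omega
  | case2 n => rw [allBits]
  | case3 n k ih1 ih2 => rw [allBits, ih1 (by omega), ih2 (by omega)]; rfl

theorem allBits_ne_nil (n k : Nat) (h : k ≤ n) : allBits n k ≠ [] := by
  induction n, k using allBits.induct with
  | case1 n => simp [allBits]
  | case2 n => omega
  | case3 n k ih1 ih2 =>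
    rw [allBits]
    have := ih1 (by omega)
    simp only [ne_eq, List.append_eq_nil_iff, List.map_eq_nil_iff]
    intro ⟨h1, _⟩
    exact this h1

theorem allBits_head? (n k : Nat) (h : k ≤ n) :
    (allBits n k).head? = some (List.replicate k 1 ++ List.replicate (n - k) 0) := by
  induction n, k using allBits.induct with
  | case1 n => simp [allBits]
  | case2 n => omega
  | case3 n k ih1 ih2 =>
    rw [allBits, List.head?_append, List.head?_map, ih1 (by omega)]
    simp [List.replicate_succ]

theorem allBits_getLast? (n k : Nat) (h : k ≤ n) :
    (allBits n k).getLast? = some (List.replicate (n - k) 0 ++ List.replicate k 1) := by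
  induction n, k using allBits.induct with
  | case1 n => simp [allBits]
  | case2 n => omega
  | case3 n k ih1 ih2 =>
    rw [allBits, List.getLast?_append]
    rcases Nat.lt_or_ge n (k + 1) with hnk | hnk
    · have hk : k = n := by omega
      rw [allBits_empty n (k + 1) (by omega)]
      simp only [List.map_nil, List.getLast?_nil, Option.none_or]
      rw [List.getLast?_map, ih1 (by omega)]
      subst hk
      simp [List.replicate_succ]
    · rw [List.getLast?_map, ih2 hnk]
      have e : n + 1 - (k + 1) = (n - (k + 1)) + 1 := by omega
      simp [e, List.replicate_succ]

theorem allBits_nodup (n k : Nat) : (allBits n k).Nodup := by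
  induction n, k using allBits.induct with
  | case1 n => simp [allBits]
  | case2 n => simp [allBits]
  | case3 n k ih1 ih2 =>
    rw [allBits]
    refine List.Nodup.append (ih1.map List.cons_injective) (ih2.map List.cons_injective) ?_
    intro x hx1 hx2
    obtain ⟨t, _, rfl⟩ := List.mem_map.mp hx1
    obtain ⟨s, _, he⟩ := List.mem_map.mp hx2
    injection he with h1 _
    exact absurd h1 (by norm_num)

-- ---- the generator steps through allBits in order ----

theorem hasMove_cons (x : Int) {t : List Int} (h : HasMove t) : HasMove (x :: t) := by
  obtain ⟨j, h1, h0⟩ := h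
  exact ⟨j + 1, by simpa using h1, by simpa using h0⟩

theorem chain_allBits (n k : Nat) :
    List.IsChain (fun a b => HasMove a ∧ stepA a = b) (allBits n k) := by
  induction n, k using allBits.induct with
  | case1 n => simp [allBits]
  | case2 n => simp [allBits]
  | case3 n k ih1 ih2 =>
    rw [allBits, List.isChain_append]
    refine ⟨?_, ?_, ?_⟩
    · rw [List.isChain_map]
      exact ih1.imp (fun a b hab =>
        ⟨hasMove_cons 1 hab.1, by rw [stepA_cons 1 hab.1, hab.2]⟩)
    · rw [List.isChain_map]
      exact ih2.imp (fun a b hab =>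
        ⟨hasMove_cons 0 hab.1, by rw [stepA_cons 0 hab.1, hab.2]⟩)
    · intro x hx y hy
      rcases Nat.lt_or_ge n (k + 1) with hnk | hnk
      · rw [allBits_empty n (k + 1) (by omega)] at hy
        simp at hy
      · rw [List.getLast?_map, allBits_getLast? n k (by omega)] at hx
        rw [List.head?_map, allBits_head? n (k + 1) hnk] at hy
        simp only [Option.map_some, Option.mem_def, Option.some_inj] at hx hy
        subst hx
        subst hy
        have hnk1 : 1 ≤ n - k := by omega
        constructor
        · refine ⟨0, by simp, ?_⟩
          have e : List.replicate (n - k) (0 : Int) = 0 :: List.replicate (n - k - 1) 0 := by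
            conv_lhs => rw [show n - k = (n - k - 1) + 1 by omega]
            simp [List.replicate_succ]
          simp [e]
        · rw [stepA_junction (n - k) k hnk1]
          have e1 : n - k - 1 = n - (k + 1) := by omega
          rw [e1]


-- ---- the enumeration and summation bridges between the two ports ----

theorem sumCheck_eq (array : List Int) : ∀ (bits : List Int) (i : Nat) (idxs : List Int)
    (s : Option Int), sumCheckLoop array bits i idxs s =
      (idxs ++ (onesIdx i bits).map Int.ofNat, accLoop array (onesIdx i bits) s) := by
  intro bits
  induction bits with
  | nil => intro i idxs s; simp [sumCheckLoop, onesIdx, accLoop]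
  | cons b t ih =>
    intro i idxs s
    by_cases hb : b = 1
    · simp [sumCheckLoop, onesIdx, hb, accLoop, ih]
    · simp [sumCheckLoop, onesIdx, hb, ih]

theorem firstMatch_eq (array : List Int) (target : Int) : ∀ (M : List (List Int)),
    firstMatch array target M = findCombo array target (M.map (onesIdx 0)) := by
  intro M
  induction M with
  | nil => rfl
  | cons cb M ih =>
    simp only [firstMatch, List.map_cons, findCombo, sumCheck_eq array cb 0 [] none,
      List.nil_append]
    split_ifs <;> simp [ih]

theorem onesIdx_replicate_zero (m : Nat) : ∀ s : Nat, onesIdx s (List.replicate m 0) = [] := by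
  induction m with
  | zero => intro s; rfl
  | succ m ih => intro s; simp [List.replicate_succ, onesIdx, ih]

theorem combos_allBits (n k : Nat) : ∀ s : Nat,
    combosB (n + s) s k = (allBits n k).map (onesIdx s) := by
  induction n, k using allBits.induct with
  | case1 n => intro s; simp [combosB, allBits, onesIdx_replicate_zero]
  | case2 k =>
    intro s
    rw [combosB, allBits]
    have e : 0 + s - k - s = 0 := by omega
    rw [e]
    simp
  | case3 n k ih1 ih2 =>
    intro s
    rcases Nat.lt_or_ge n k with hnk | hnk
    · -- both sides empty
      rw [combosB, allBits, allBits_empty n k (by omega), allBits_empty n (k + 1) (by omega)]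
      have e : n + 1 + s - k - s = 0 := by omega
      rw [e]
      simp
    · rw [combosB]
      have e : n + 1 + s - k - s = (n - k) + 1 := by omega
      rw [e, List.range'_succ, List.flatMap_cons]
      have h1 : combosB (n + 1 + s) (s + 1) k = (allBits n k).map (onesIdx (s + 1)) := by
        have := ih1 (s + 1)
        rwa [show n + (s + 1) = n + 1 + s by omega] at this
      have h2 : (List.range' (s + 1) (n - k)).flatMap
            (fun f => (combosB (n + 1 + s) (f + 1) k).map (f :: ·))
          = combosB (n + 1 + s) (s + 1) (k + 1) := by
        rw [combosB]
        have e2 : n + 1 + s - k - (s + 1) = n - k := by omega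
        rw [e2]
      have h3 : combosB (n + 1 + s) (s + 1) (k + 1) = (allBits n (k + 1)).map (onesIdx (s + 1)) := by
        have := ih2 (s + 1)
        rwa [show n + (s + 1) = n + 1 + s by omega] at this
      rw [h1, h2, h3, allBits]
      simp only [List.map_append, List.map_map]
      congr 1

-- ---- fuel bound ----

theorem length_allBits (n k : Nat) : (allBits n k).length = n.choose k := by
  induction n, k using allBits.induct with
  | case1 n => simp [allBits]
  | case2 k => simp [allBits]
  | case3 n k ih1 ih2 => simp [allBits, ih1, ih2, Nat.choose_succ_succ]

theorem choose_lt_two_pow (n ss : Nat) (h1 : 1 ≤ ss) (h2 : ss ≤ n) : n.choose ss < 2 ^ n := by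
  have hsub : ({0, ss} : Finset ℕ) ⊆ Finset.range (n + 1) := by
    intro x hx
    simp only [Finset.mem_insert, Finset.mem_singleton] at hx
    rcases hx with rfl | rfl
    · simp
    · simp; omega
  have hpair : ∑ i ∈ ({0, ss} : Finset ℕ), n.choose i = n.choose 0 + n.choose ss :=
    Finset.sum_pair (by omega)
  have hle := Finset.sum_le_sum_of_subset hsub (f := fun i => n.choose i)
  rw [Nat.sum_range_choose, hpair] at hle
  simp only [Nat.choose_zero_right] at hle
  omega

-- ---- running A's inner loop along the chain of generated combinations ----

theorem run_loop (array : List Int) (target : Int) (n ss : Nat) (finalC : List Int) :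
    ∀ (L : List (List Int)) (prev : List Int) (fuel : Nat),
    List.IsChain (fun a b => genNext n ss a = b) (prev :: L) →
    (prev :: L).getLast? = some finalC →
    (∀ x ∈ (prev :: L).dropLast, x ≠ finalC) →
    L.length < fuel →
    innerLoop array target n ss finalC prev fuel = firstMatch array target L := by
  intro L
  induction L with
  | nil =>
    intro prev fuel _ hlast _ hf
    have hp : prev = finalC := by simpa using hlast
    cases fuel with
    | zero => omega
    | succ f => simp [innerLoop, hp, firstMatch]
  | cons cb L ih =>
    intro prev fuel hch hlast hdl hf
    cases fuel with
    | zero => omega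
    | succ f =>
      have hne : prev ≠ finalC := hdl prev (by simp)
      have hgen : genNext n ss prev = cb := (List.isChain_cons.mp hch).1 cb (by simp)
      rw [innerLoop]
      simp only [if_neg hne, hgen, firstMatch]
      by_cases hm : (sumCheckLoop array cb 0 [] none).2 = some target
      · simp [hm]
      · simp only [if_neg hm]
        refine ih cb f (List.isChain_cons.mp hch).2 ?_ ?_ (by simp at hf ⊢; omega)
        · rw [← List.getLast?_cons_cons (a := prev)]; exact hlast
        · intro x hx
          refine hdl x ?_
          rcases L with _ | ⟨c2, L2⟩
          · simp at hx
          · simp only [List.dropLast] at hx ⊢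
            simp [hx]

theorem nodup_dropLast_ne {l : List (List Int)} {z : List Int} (hnd : l.Nodup)
    (hz : l.getLast? = some z) : ∀ x ∈ l.dropLast, x ≠ z := by
  intro x hx
  have hne : l ≠ [] := by intro h; subst h; simp at hz
  have hl : l.dropLast ++ [l.getLast hne] = l := List.dropLast_concat_getLast hne
  have hzz : l.getLast hne = z := by
    have := List.getLast?_eq_some_getLast (l := l) hne
    rw [hz] at this
    exact (Option.some_inj.mp this).symm
  rw [← hl] at hnd
  have hdisj := List.disjoint_of_nodup_append hnd
  intro he
  subst he
  exact hdisj hx (by simp [hzz])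

theorem inner_eq (array : List Int) (target : Int) (n ss : Nat) (h1 : 1 ≤ ss) (h2 : ss ≤ n) :
    innerLoop array target n ss (List.replicate (n - ss) 0 ++ List.replicate ss 1)
      (List.replicate n 0) (2 ^ n) = firstMatch array target (allBits n ss) := by
  apply run_loop
  · rw [List.isChain_cons]
    constructor
    · intro y hy
      rw [allBits_head? n ss h2] at hy
      simp only [Option.mem_def, Option.some_inj] at hy
      subst hy
      rw [genNext, if_pos rfl]
    · rw [List.isChain_iff_getElem]
      intro i hi
      obtain ⟨hmv, hstep⟩ := (List.isChain_iff_getElem.mp (chain_allBits n ss)) i hi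
      have hmem : (allBits n ss)[i] ∈ allBits n ss := List.getElem_mem _
      have hlen : ((allBits n ss)[i]).length = n := allBits_length n ss _ hmem
      have hnz : (allBits n ss)[i] ≠ List.replicate n 0 := by
        obtain ⟨j, hj1, _⟩ := hmv
        intro he
        rw [he, List.getElem?_replicate] at hj1
        split_ifs at hj1
        all_goals simp_all
      rw [genNext, if_neg hnz]
      have : stepLoop n ((allBits n ss)[i]) 0 ((n : Int) - 1) = stepA ((allBits n ss)[i]) := by
        rw [stepA, hlen]
      rw [this, hstep]
  · cases hAB : allBits n ss with
    | nil => exact absurd hAB (allBits_ne_nil n ss h2)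
    | cons a l =>
      rw [List.getLast?_cons_cons, ← hAB, allBits_getLast? n ss h2]
  · intro x hx
    cases hAB : allBits n ss with
    | nil => exact absurd hAB (allBits_ne_nil n ss h2)
    | cons a l =>
      rw [hAB] at hx
      simp only [List.dropLast, List.mem_cons] at hx
      have hfin : (List.replicate (n - ss) (0 : Int) ++ List.replicate ss 1).count 1 = ss := by
        simp [List.count_append, List.count_replicate]
      rcases hx with rfl | hx
      · intro he
        have : (List.replicate n (0 : Int)).count 1 = 0 := by simp [List.count_replicate]
        rw [he, hfin] at this
        omega
      · have := nodup_dropLast_ne (allBits_nodup n ss) (allBits_getLast? n ss h2) x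
        rw [hAB] at this
        exact this (by simpa using hx)
  · simp only [length_allBits]
    exact choose_lt_two_pow n ss h1 h2

-- ---- assembling the outer loops ----

theorem outer_eq (array : List Int) (target : Int) (n : Nat) :
    ∀ sizes : List Nat, (∀ ss ∈ sizes, 1 ≤ ss ∧ ss ≤ n) →
    outerLoop array target n sizes = altScan array target n sizes := by
  intro sizes
  induction sizes with
  | nil => intro _; rfl
  | cons ss rest ih =>
    intro hss
    rw [outerLoop, altScan]
    have h1 := (hss ss (by simp)).1
    have h2 := (hss ss (by simp)).2
    have hcb : combosB n 0 ss = (allBits n ss).map (onesIdx 0) := by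
      have := combos_allBits n ss 0
      rwa [Nat.add_zero] at this
    rw [inner_eq array target n ss h1 h2, firstMatch_eq, ← hcb]
    cases h : findCombo array target (combosB n 0 ss) <;>
      simp [ih (fun x hx => hss x (by simp [hx]))]

theorem perfect_sum_spec : Claim_equal_perfect_sum := by
  intro array target _
  unfold Spec_perfect_sum perfect_sum perfect_sum_alt
  exact outer_eq array target array.length (List.range' 1 array.length)
    (fun ss hss => by rw [List.mem_range'_1] at hss; omega)
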